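-- pv_equiv track=rewrite | github.com/satomic/API4CLIx | src/adapters/base.py | _format_command_for_logging
-- ===== SOURCE A (Python) =====
-- from typing import Dict, Any, Optional, List
--
-- def _format_command_for_logging(cmd: List[str]) -> str:
--     """
--     Format command for logging with proper quoting for readability.
--
--     Args:
--         cmd: Command and arguments as a list
--
--     Returns:
--         Formatted command string with proper quoting
--     """
--     formatted_parts = []
--     i = 0
--     while i < len(cmd):
--         part = cmd[i]
--
--         # If this is a -p flag followed by a prompt, quote the prompt
--         if part == "-p" and i + 1 < len(cmd):
--             formatted_parts.append(part)
--             i += 1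
--             prompt = cmd[i]
--             # Add quotes around the prompt for better readability
--             formatted_parts.append(f'"{prompt}"')
--         else:
--             # For other parts, add quotes if they contain spaces
--             if ' ' in part:
--                 formatted_parts.append(f'"{part}"')
--             else:
--                 formatted_parts.append(part)
--         i += 1
--
--     return ' '.join(formatted_parts)
-- ===== SOURCE B (Python) =====
-- def _format_command_for_logging(cmd):
--     """Marker-jump formatting: instead of walking token by token, repeatedly
--     locate the next effective "-p" marker with list.index, bulk-quote the
--     slice before it by the space rule, emit the marker and its quoted prompt,
--     and continue on the remaining slice."""
--     def q(t):
--         return f'"{t}"' if ' ' in t else t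
--
--     out = []
--     rest = cmd
--     while "-p" in rest:
--         j = rest.index("-p")
--         if j == len(rest) - 1:
--             break  # trailing marker has no prompt; fall through to the space rule
--         out.extend(q(t) for t in rest[:j])
--         out.append("-p")
--         out.append(f'"{rest[j + 1]}"')
--         rest = rest[j + 2:]
--     out.extend(q(t) for t in rest)
--     return ' '.join(out)
-- ===== Notes on version B (the rewrite author's own statement) =====
-- stated objective: alternative
-- what changed: Replaced the token-by-token while-loop with index lookahead by a marker-jump scheme: repeatedly locate the next '-p' via list.index, bulk-quote the slice before it by the space rule, emit the marker and its quoted prompt, and continue on the remaining slice.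
import Mathlib
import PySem

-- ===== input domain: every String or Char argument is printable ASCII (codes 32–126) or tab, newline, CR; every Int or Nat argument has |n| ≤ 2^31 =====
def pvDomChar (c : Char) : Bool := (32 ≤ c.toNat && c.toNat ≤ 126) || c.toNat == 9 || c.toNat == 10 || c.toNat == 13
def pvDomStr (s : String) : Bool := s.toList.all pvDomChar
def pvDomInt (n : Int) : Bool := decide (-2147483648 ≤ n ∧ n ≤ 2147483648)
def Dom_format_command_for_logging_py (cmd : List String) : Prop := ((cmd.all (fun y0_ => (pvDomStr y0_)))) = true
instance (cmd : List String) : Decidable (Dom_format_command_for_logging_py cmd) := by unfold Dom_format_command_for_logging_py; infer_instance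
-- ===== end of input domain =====

-- B replaces A's token-by-token lookahead loop with a marker-jump scheme: it
-- repeatedly finds the next "-p" by list.index, bulk-quotes the slice before it,
-- emits the marker with its quoted prompt, and recurses on the remaining slice
-- (objective: alternative decomposition, same O(n) cost).


-- ===== PORT A =====
-- quote a part iff it contains a space (A's else-branch)
def pvQuoteIfSpace (part : String) : String :=
  if PySem.Str.isIn " " part then "\"" ++ part ++ "\"" else part

-- A's while-loop: at each index, if part == "-p" and a next token exists,
-- emit "-p" and the next token quoted and advance by 2; otherwise emit the
-- part (quoted iff it has a space) and advance by 1.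
def pvPartsA : List String → List String
  | [] => []
  | [part] => [pvQuoteIfSpace part]
  | part :: next :: rest =>
    if part = "-p" then part :: ("\"" ++ next ++ "\"") :: pvPartsA rest
    else pvQuoteIfSpace part :: pvPartsA (next :: rest)

def format_command_for_logging_py (cmd : List String) : String :=
  PySem.Str.join " " (pvPartsA cmd)

-- ===== PORT B =====
-- Source B's helper q is the same trivial quote-by-space rule; pvQuoteIfSpace is reused for it.
-- Source B's while-loop over `rest`: find the first "-p" (index? = list.index /
-- the `"-p" in rest` test); if absent or last, quote the remainder by the
-- space rule and stop; else emit the bulk-quoted prefix rest[:j], "-p", the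
-- quoted prompt rest[j+1] (in range, so pyGet?-with-default is exact), and
-- continue on the slice rest[j+2:] (take/drop are the exact nonnegative slices).
def pvPartsB (rest : List String) : List String :=
  match h : PySem.List.index? rest "-p" with
  | none => rest.map pvQuoteIfSpace
  | some j =>
    if j = rest.length - 1 then rest.map pvQuoteIfSpace
    else (rest.take j).map pvQuoteIfSpace
         ++ "-p" :: ("\"" ++ ((PySem.List.pyGet? rest ((j : Int) + 1)).getD "") ++ "\"")
         :: pvPartsB (rest.drop (j + 2))
termination_by rest.length
decreasing_by
  obtain ⟨hk, -, -⟩ := PySem.List.getElem_of_index?_eq_some h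
  simp only [List.length_drop]; omega

def format_command_for_logging_py_alt (cmd : List String) : String :=
  PySem.Str.join " " (pvPartsB cmd)

-- ===== PRECONDITION & SPEC =====
def Spec_format_command_for_logging_py (cmd : List String) (out : String) : Prop := out = format_command_for_logging_py_alt cmd
instance (cmd : List String) (out : String) : Decidable (Spec_format_command_for_logging_py cmd out) := by unfold Spec_format_command_for_logging_py; infer_instance

-- ===== CLAIM (what is proved, stated in full; the proofs are below) =====
def Claim_equal_format_command_for_logging_py : Prop := ∀ (cmd : List String), Dom_format_command_for_logging_py cmd → Spec_format_command_for_logging_py cmd (format_command_for_logging_py cmd)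

-- ===== LEMMAS AND PROOFS =====

-- A's loop over a marker-free prefix is an elementwise quote-by-space map.
lemma pvPartsA_prefix (pre tl : List String) (hp : "-p" ∉ pre) :
    pvPartsA (pre ++ tl) = pre.map pvQuoteIfSpace ++ pvPartsA tl := by
  induction pre with
  | nil => rfl
  | cons p pre ih =>
      have hpne : p ≠ "-p" := fun h => hp (h ▸ List.mem_cons_self)
      have hp' : "-p" ∉ pre := fun h => hp (List.mem_cons_of_mem _ h)
      cases hpt : pre ++ tl with
      | nil =>
          obtain ⟨rfl, rfl⟩ := List.append_eq_nil_iff.mp hpt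
          simp [pvPartsA]
      | cons x xs =>
          rw [List.cons_append, hpt]
          simp only [pvPartsA, if_neg hpne]
          rw [← hpt, ih hp']
          rfl

lemma pvQuoteIfSpace_dashp : pvQuoteIfSpace "-p" = "-p" := by decide

lemma pvPartsB_of_none (rest : List String)
    (h : PySem.List.index? rest "-p" = none) : pvPartsB rest = rest.map pvQuoteIfSpace := by
  rw [pvPartsB]
  split
  · rfl
  · rename_i j heq; rw [h] at heq; cases heq

lemma pvPartsB_of_some (rest : List String) (j : Nat)
    (h : PySem.List.index? rest "-p" = some j) :
    pvPartsB rest =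
      if j = rest.length - 1 then rest.map pvQuoteIfSpace
      else (rest.take j).map pvQuoteIfSpace
           ++ "-p" :: ("\"" ++ ((PySem.List.pyGet? rest ((j : Int) + 1)).getD "") ++ "\"")
           :: pvPartsB (rest.drop (j + 2)) := by
  rw [pvPartsB]
  split
  · rename_i heq; rw [h] at heq; cases heq
  · rename_i j' heq; rw [h] at heq; injection heq with e; subst e; rfl

lemma pvParts_eq (cmd : List String) : pvPartsA cmd = pvPartsB cmd := by
  induction cmd using pvPartsB.induct with
  | case1 rest h =>
      rw [pvPartsB_of_none rest h]
      have hnm : "-p" ∉ rest := (PySem.List.index?_eq_none_iff rest _).mp h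
      have := pvPartsA_prefix rest [] hnm
      simpa [pvPartsA] using this
  | case2 rest h =>
      rw [pvPartsB_of_some rest _ h, if_pos rfl]
      obtain ⟨pre, suf, hrest, hlen, hnm⟩ := (PySem.List.index?_eq_some_iff rest _ _).mp h
      have hsuf : suf = [] := by
        have hl : rest.length = pre.length + suf.length + 1 := by simp [hrest]; omega
        have : suf.length = 0 := by omega
        exact List.eq_nil_of_length_eq_zero this
      subst hsuf
      rw [hrest, pvPartsA_prefix pre ["-p"] hnm]
      simp [pvPartsA, pvQuoteIfSpace_dashp]
  | case3 rest j h hlast ih =>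
      rw [pvPartsB_of_some rest j h, if_neg hlast]
      obtain ⟨pre, suf, hrest, hlen, hnm⟩ := (PySem.List.index?_eq_some_iff rest _ _).mp h
      have hsufne : suf ≠ [] := by
        intro hs
        apply hlast
        subst hs
        simp [hrest, hlen]
      obtain ⟨nxt, tail, rfl⟩ := List.exists_cons_of_ne_nil hsufne
      have htake : rest.take j = pre := by
        rw [hrest, ← hlen]; exact List.take_left
      have hget : PySem.List.pyGet? rest ((j : Int) + 1) = some nxt := by
        have hc : ((j : Int) + 1) = ((j + 1 : Nat) : Int) := by push_cast; ring
        rw [hc, PySem.List.pyGet?_natCast, hrest, ← hlen,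
            List.getElem?_append_right (by omega)]
        simp
      have hdrop : rest.drop (j + 2) = tail := by
        rw [hrest, ← hlen]
        simp [List.drop_append]
      rw [htake, hget, hdrop]
      rw [hrest, pvPartsA_prefix pre _ hnm]
      rw [hdrop] at ih
      simp [pvPartsA, ih]

-- ===== VERDICT (by name: the statement is the Claim_ definition above) =====
theorem format_command_for_logging_py_spec : Claim_equal_format_command_for_logging_py := by
  intro cmd _
  unfold Spec_format_command_for_logging_py format_command_for_logging_py format_command_for_logging_py_alt
  rw [pvParts_eq]
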